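-- pv_equiv track=rewrite | github.com/Azcobu/Advent-of-Code-2021 | 2016/day07/aoc2016-7a.py | verify_ip
-- ===== SOURCE A (Python) =====
-- def find_abba(instr):
--     for pos, letter in enumerate(instr[:-3]):
--         if instr[pos] != instr[pos+1]:
--             pair = instr[pos] + instr[pos+1]
--             if instr[pos:pos+4] == pair + pair[::-1]:
--                 return True
--     return False
--
-- def verify_ip(instr):
--     found = False
--     outside = True if instr[0] != '[' else False
--     instr = instr.replace('[', ']').split(']')
--     for s in instr:
--         if find_abba(s):
--             if not outside:
--                 return False
--             else:
--                 found = True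
--         outside = not outside
--     return found
-- ===== SOURCE B (Python) =====
-- def verify_ip(instr):
--     outside = instr[0] != '['
--     a = b = c = None
--     sup = hyp = False
--     for ch in instr:
--         if ch == '[' or ch == ']':
--             outside = not outside
--             a = b = c = None
--         else:
--             if a is not None and a == ch and b == c and a != b:
--                 if outside:
--                     sup = True
--                 else:
--                     hyp = True
--             a, b, c = b, c, ch
--     return sup and not hyp
-- ===== Notes on version B (the rewrite author's own statement) =====
-- stated objective: alternative
-- what changed: B never splits the string: it is a single streaming pass over the characters that toggles an outside flag at every bracket, keeps only the last three characters of the current segment as a 3-slot window, detects an ABBA the moment its fourth character arrives, and accumulates two flags (supernet hit / hypernet hit), returning sup and not hyp; A materialises the segment list via replace/split, runs a separate index-and-slice sliding-window scan per segment, and uses a toggled flag with an early return.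
import Mathlib
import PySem

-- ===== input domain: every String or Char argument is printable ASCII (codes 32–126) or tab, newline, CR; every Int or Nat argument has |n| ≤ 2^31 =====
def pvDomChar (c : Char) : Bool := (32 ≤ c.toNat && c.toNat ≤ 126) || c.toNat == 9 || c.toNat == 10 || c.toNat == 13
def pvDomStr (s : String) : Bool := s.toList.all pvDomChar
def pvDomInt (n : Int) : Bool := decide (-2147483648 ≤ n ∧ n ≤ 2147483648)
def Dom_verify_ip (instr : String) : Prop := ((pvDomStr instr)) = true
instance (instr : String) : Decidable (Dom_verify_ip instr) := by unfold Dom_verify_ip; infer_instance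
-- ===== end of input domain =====

-- B replaces A's replace/split segmentation, per-segment sliding-window scans and early-return
-- toggle loop by one streaming pass over the characters with a 3-char window and two hit flags.

-- ===== PORT A =====
-- find_abba: for pos, letter in enumerate(instr[:-3]): … (loop with early 'return True')
def find_abba_loop (s : List Char) (items : List (Int × Char)) : Bool :=
  match items with
  | [] => false
  | (pos, _) :: rest =>
    if PySem.List.pyGetD s pos ' ' ≠ PySem.List.pyGetD s (pos + 1) ' ' then
      -- pair = instr[pos] + instr[pos+1]; instr[pos:pos+4] == pair + pair[::-1]
      let pair := [PySem.List.pyGetD s pos ' ', PySem.List.pyGetD s (pos + 1) ' ']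
      if PySem.List.slice s (some pos) (some (pos + 4)) = pair ++ pair.reverse then true
      else find_abba_loop s rest
    else find_abba_loop s rest

def find_abba (s : List Char) : Bool :=
  find_abba_loop s (PySem.List.enumerate (PySem.List.slice s none (some (-3))) 0)

-- the for-loop of verify_ip, with its early 'return False' and the found/outside state
def verify_ip_loop (segs : List (List Char)) (found outside : Bool) : Bool :=
  match segs with
  | [] => found
  | s :: rest =>
    if find_abba s then
      if !outside then false
      else verify_ip_loop rest true (!outside)
    else verify_ip_loop rest found (!outside)

def verify_ip (instr : String) : Bool :=
  let cs := instr.toList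
  let outside := if PySem.List.pyGetD cs 0 ' ' ≠ '[' then true else false
  let segs := PySem.Chars.splitOn (PySem.Chars.replace cs ['['] [']']) [']']
  verify_ip_loop segs false outside

-- ===== PORT B =====
-- one step of Source B's for-loop; state = (outside, (a, b, c), sup, hyp), a/b/c the window (None = Option.none)
def verify_step (st : Bool × (Option Char × Option Char × Option Char) × Bool × Bool)
    (ch : Char) : Bool × (Option Char × Option Char × Option Char) × Bool × Bool :=
  match st with
  | (o, (a, b, c), sup, hyp) =>
    if ch = '[' ∨ ch = ']' then (!o, (none, none, none), sup, hyp)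
    else
      -- if a is not None and a == ch and b == c and a != b: (sup/hyp set by outside)
      let hit := a.isSome && (a == some ch) && (b == c) && (a != b)
      ((o, (b, c, some ch), sup || (hit && o), hyp || (hit && !o)) :
        Bool × (Option Char × Option Char × Option Char) × Bool × Bool)

def verify_ip_alt (instr : String) : Bool :=
  let cs := instr.toList
  let o : Bool := PySem.List.pyGetD cs 0 ' ' != '['
  let st := cs.foldl verify_step (o, (none, none, none), false, false)
  st.2.2.1 && !st.2.2.2

-- ===== PRECONDITION & SPEC =====
-- Pre_ excludes only the empty string, on which both A and B raise IndexError at instr[0].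
def Pre_verify_ip (instr : String) : Prop := instr ≠ ""
instance (instr : String) : Decidable (Pre_verify_ip instr) := by unfold Pre_verify_ip; infer_instance
def pvWitness_verify_ip : String := "abba[mnop]qrst"

def Spec_verify_ip (instr : String) (out : Bool) : Prop := out = verify_ip_alt instr
instance (instr : String) (out : Bool) : Decidable (Spec_verify_ip instr out) := by unfold Spec_verify_ip; infer_instance

-- ===== CLAIM (what is proved, stated in full; the proofs are below) =====
def Claim_equal_verify_ip : Prop := ∀ (instr : String), Dom_verify_ip instr → Pre_verify_ip instr → Spec_verify_ip instr (verify_ip instr)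

-- ===== LEMMAS AND PROOFS =====

-- ---------- A-side characterisation (find_abba and the loop) ----------

-- the condition A's inner loop tests at one position
def abbaStep (s : List Char) (pos : Int) : Bool :=
  if PySem.List.pyGetD s pos ' ' ≠ PySem.List.pyGetD s (pos + 1) ' ' then
    let pair := [PySem.List.pyGetD s pos ' ', PySem.List.pyGetD s (pos + 1) ' ']
    decide (PySem.List.slice s (some pos) (some (pos + 4)) = pair ++ pair.reverse)
  else false

theorem find_abba_loop_eq_any (s : List Char) (items : List (Int × Char)) :
    find_abba_loop s items = items.any (fun p => abbaStep s p.1) := by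
  induction items with
  | nil => rfl
  | cons p rest ih =>
    obtain ⟨pos, c⟩ := p
    simp only [find_abba_loop, abbaStep, List.any_cons, ih]
    simp only [List.reverse_cons, List.reverse_nil, List.nil_append, List.cons_append]
    split_ifs with h1 h2 <;> simp_all

theorem drop_take_four (s : List Char) (k : Nat) (h : k + 4 ≤ s.length) :
    (s.drop k).take 4 = [s[k], s[k+1], s[k+2], s[k+3]] := by
  apply List.ext_getElem
  · simp; omega
  · intro i h1 h2
    have hi : i < 4 := by simpa using h2
    simp only [List.getElem_take, List.getElem_drop]
    interval_cases i <;> rfl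

theorem abbaStep_natCast (s : List Char) (k : Nat) (h : k + 4 ≤ s.length) :
    abbaStep s (k : Int) =
      (decide (s[k] = s[k+3]) && decide (s[k+1] = s[k+2]) && !decide (s[k] = s[k+1])) := by
  have e1 : ((k : Int) + 1) = ((k + 1 : Nat) : Int) := by push_cast; ring
  have e4 : ((k : Int) + 4) = ((k + 4 : Nat) : Int) := by push_cast; ring
  have g0 : PySem.List.pyGetD s (k : Int) ' ' = s[k] := by
    rw [PySem.List.pyGetD_natCast]; exact List.getD_eq_getElem s ' ' (by omega)
  have g1 : PySem.List.pyGetD s ((k : Int) + 1) ' ' = s[k+1] := by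
    rw [e1, PySem.List.pyGetD_natCast]; exact List.getD_eq_getElem s ' ' (by omega)
  have hsl : PySem.List.slice s (some (k : Int)) (some ((k : Int) + 4)) =
      [s[k], s[k+1], s[k+2], s[k+3]] := by
    rw [e4, PySem.List.slice_natCast]
    have : k + 4 - k = 4 := by omega
    rw [this, drop_take_four s k h]
  unfold abbaStep
  rw [g0, g1, hsl]
  simp only [List.reverse_cons, List.reverse_nil, List.nil_append, List.cons_append]
  by_cases h1 : s[k] = s[k+1]
  · simp [h1]
  · simp only [ne_eq, h1, not_false_iff, if_true]
    by_cases ha : s[k] = s[k+3] <;> by_cases hb : s[k+1] = s[k+2] <;>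
      simp [ha, hb, eq_comm]

theorem find_abba_iff (s : List Char) :
    find_abba s = true ↔
      ∃ k : Nat, ∃ hk : k + 4 ≤ s.length,
        (s[k] = s[k+3] ∧ s[k+1] = s[k+2] ∧ s[k] ≠ s[k+1]) := by
  rw [find_abba, find_abba_loop_eq_any]
  rw [show PySem.List.slice s none (some (-3)) = s.take (s.length - 3) from
    PySem.List.slice_to_neg_ofNat s 3 (by omega)]
  rw [List.any_eq_true]
  constructor
  · rintro ⟨p, hp, hstep⟩
    rw [PySem.List.mem_enumerate_iff] at hp
    obtain ⟨k, hk, rfl⟩ := hp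
    have hk' : k + 4 ≤ s.length := by
      have := hk; simp [List.length_take] at this; omega
    simp only [zero_add] at hstep
    rw [abbaStep_natCast s k hk'] at hstep
    exact ⟨k, hk', by simpa [and_assoc] using hstep⟩
  · rintro ⟨k, hk, h1, h2, h3⟩
    refine ⟨((k : Int), (s.take (s.length - 3))[k]'(by simp; omega)), ?_, ?_⟩
    · rw [PySem.List.mem_enumerate_iff]
      exact ⟨k, by simp; omega, by simp⟩
    · simp only
      rw [abbaStep_natCast s k hk, decide_eq_true h1, decide_eq_true h2, decide_eq_false h3]
      rfl

-- the segments A's loop treats with current flag b, keeping those where the flag is true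
def supers (segs : List (List Char)) (b : Bool) : List (List Char) :=
  match segs with
  | [] => []
  | s :: rest => if b then s :: supers rest (!b) else supers rest (!b)

theorem verify_ip_loop_eq (segs : List (List Char)) (found outside : Bool) :
    verify_ip_loop segs found outside =
      ((found || (supers segs outside).any find_abba) &&
        !((supers segs (!outside)).any find_abba)) := by
  induction segs generalizing found outside with
  | nil => cases found <;> simp [verify_ip_loop, supers]
  | cons s rest ih =>
    simp only [verify_ip_loop, supers]
    by_cases h : find_abba s = true <;> cases outside <;>
      simp [h, ih]

-- ---------- the bracket split, done without fuel ----------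

-- '[' ↦ ']', the character map A's replace performs
def brmap (c : Char) : Char := if c = '[' then ']' else c

-- split at every bracket character, with the pending (already read) chunk p
def splitBrAux (p : List Char) (cs : List Char) : List (List Char) :=
  match cs with
  | [] => [p]
  | c :: rest => if c = '[' ∨ c = ']' then p :: splitBrAux [] rest else splitBrAux (p ++ [c]) rest

def splitBr (cs : List Char) : List (List Char) := splitBrAux [] cs

theorem replace_go_map (l : List Char) (acc : List Char) (fuel : Nat) (h : l.length ≤ fuel) :
    PySem.Chars.replace.go ['['] [']'] fuel l acc = acc.reverse ++ l.map brmap := by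
  induction l generalizing acc fuel with
  | nil =>
    cases fuel <;> simp [PySem.Chars.replace.go]
  | cons c rest ih =>
    cases fuel with
    | zero => simp at h
    | succ f =>
      rw [PySem.Chars.replace.go]
      by_cases hc : c = '['
      · subst hc
        simp only [List.isPrefixOf, BEq.rfl, Bool.and_self, if_true]
        rw [show List.drop ['['].length ('[' :: rest) = rest from rfl,
          ih _ _ (by simpa using h)]
        simp [brmap]
      · have : (['['] : List Char).isPrefixOf (c :: rest) = false := by
          simp [List.isPrefixOf]
          exact fun hx => hc hx.symm
        simp only [this, Bool.false_eq_true, if_false]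
        rw [ih _ _ (by simpa using h)]
        simp [brmap, hc]

theorem replace_eq_map (cs : List Char) :
    PySem.Chars.replace cs ['['] [']'] = cs.map brmap := by
  rw [PySem.Chars.replace]
  simp only [List.isEmpty_cons, Bool.false_eq_true, if_false]
  exact replace_go_map cs [] cs.length le_rfl

theorem splitOn_go_eq (l : List Char) (cur : List Char) (acc : List (List Char)) (fuel : Nat) (h : l.length ≤ fuel) :
    PySem.Chars.splitOn.go [']'] fuel (l.map brmap) cur acc =
      acc.reverse ++ splitBrAux cur.reverse l := by
  induction l generalizing cur acc fuel with
  | nil =>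
    cases fuel <;> simp [PySem.Chars.splitOn.go, splitBrAux]
  | cons c rest ih =>
    cases fuel with
    | zero => simp at h
    | succ f =>
      rw [List.map_cons, PySem.Chars.splitOn.go]
      by_cases hc : c = '[' ∨ c = ']'
      · have hb : brmap c = ']' := by rcases hc with h|h <;> simp [brmap, h]
        simp only [hb]
        rw [show List.drop [']'].length (']' :: rest.map brmap) = rest.map brmap from rfl]
        rw [ih _ _ _ (by simpa using h)]
        simp [splitBrAux, hc]
      · have hb : brmap c = c := by
          simp [brmap]; intro hx; exact absurd (Or.inl hx) hc
        have hcne : c ≠ ']' := fun hx => hc (Or.inr hx)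
        rw [if_neg (by simp [List.isPrefixOf, hb]; exact fun hx => hcne hx.symm)]
        simp only [hb]
        rw [ih _ _ _ (by simpa using h)]
        simp [splitBrAux, hc]

theorem splitOn_eq_splitBr (cs : List Char) :
    PySem.Chars.splitOn (PySem.Chars.replace cs ['['] [']']) [']'] = splitBr cs := by
  rw [replace_eq_map, PySem.Chars.splitOn, splitOn_go_eq cs [] [] _ (by simp)]
  simp [splitBr]

theorem splitBrAux_eq (cs : List Char) (p : List Char) :
    splitBrAux p cs = (p ++ (splitBr cs).headI) :: (splitBr cs).tail := by
  induction cs generalizing p with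
  | nil => simp [splitBrAux, splitBr]
  | cons c rest ih =>
    by_cases hc : c = '[' ∨ c = ']'
    · simp [splitBrAux, splitBr, hc]
    · simp only [splitBrAux, splitBr, hc, if_false]
      rw [ih (p ++ [c])]
      simp only [List.nil_append]
      rw [ih [c]]
      simp

-- ---------- B-side model ----------

-- the window Source B keeps: the last (up to three) characters of the pending chunk p
def win (p : List Char) : Option Char × Option Char × Option Char :=
  (if 3 ≤ p.length then p[p.length-3]? else none,
   if 2 ≤ p.length then p[p.length-2]? else none,
   if 1 ≤ p.length then p[p.length-1]? else none)

-- Source B's hit test, expressed on the pending chunk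
def hitAt (p : List Char) (ch : Char) : Bool :=
  ((win p).1.isSome && ((win p).1 == some ch) && ((win p).2.1 == (win p).2.2) &&
    ((win p).1 != (win p).2.1))

-- 'a new ABBA ends inside s' when p has already been read in the same segment
def segD (p : List Char) (s : List Char) : Bool :=
  match s with
  | [] => false
  | ch :: rest => hitAt p ch || segD (p ++ [ch]) rest

-- hits of the stream on the segment list: head segment still carries the pending chunk p
def hitsOf (p : List Char) (segs : List (List Char)) (o : Bool) : Bool × Bool :=
  match segs with
  | [] => (false, false)
  | s :: rest =>
    let r := hitsOf [] rest (!o)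
    ((o && segD p s) || r.1, ((!o) && segD p s) || r.2)

theorem win_append (p : List Char) (ch : Char) :
    win (p ++ [ch]) = ((win p).2.1, (win p).2.2, some ch) := by
  unfold win
  have hl : (p ++ [ch]).length = p.length + 1 := by simp
  refine Prod.ext ?_ (Prod.ext ?_ ?_)
  · simp only [hl]
    by_cases h : 2 ≤ p.length
    · rw [if_pos (by omega), if_pos h]
      rw [show p.length + 1 - 3 = p.length - 2 from by omega,
        List.getElem?_append_left (by omega)]
    · rw [if_neg (by omega), if_neg h]
  · simp only [hl]
    by_cases h : 1 ≤ p.length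
    · rw [if_pos (by omega), if_pos h]
      rw [show p.length + 1 - 2 = p.length - 1 from by omega,
        List.getElem?_append_left (by omega)]
    · rw [if_neg (by omega), if_neg h]
  · simp only [hl]
    rw [if_pos (by omega), show p.length + 1 - 1 = p.length from by omega]
    simp

theorem win_nil : ((none, none, none) : Option Char × Option Char × Option Char) = win [] := by
  simp [win]

theorem or_and_shuffle (s h o d r : Bool) :
    ((s || (h && o)) || ((o && d) || r)) = (s || ((o && (h || d)) || r)) := by
  cases s <;> cases h <;> cases o <;> cases d <;> cases r <;> rfl

theorem splitBr_cons_bracket (c : Char) (rest : List Char) (hc : c = '[' ∨ c = ']') :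
    splitBr (c :: rest) = [] :: splitBr rest := by
  simp [splitBr, splitBrAux, hc]

theorem splitBr_head_tail (cs : List Char) :
    splitBr cs = (splitBr cs).headI :: (splitBr cs).tail := by
  have := splitBrAux_eq cs []
  simpa [splitBr] using this

theorem splitBr_cons_char (c : Char) (rest : List Char) (hc : ¬(c = '[' ∨ c = ']')) :
    splitBr (c :: rest) = (c :: (splitBr rest).headI) :: (splitBr rest).tail := by
  have h1 : splitBr (c :: rest) = splitBrAux [c] rest := by
    simp [splitBr, splitBrAux, hc]
  rw [h1, splitBrAux_eq rest [c]]
  simp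

theorem foldl_verify_step (cs : List Char) (p : List Char) (o sup hyp : Bool) :
    (cs.foldl verify_step (o, win p, sup, hyp)).2.2 =
      (sup || (hitsOf p (splitBr cs) o).1, hyp || (hitsOf p (splitBr cs) o).2) := by
  induction cs generalizing p o sup hyp with
  | nil => simp [splitBr, splitBrAux, hitsOf, segD]
  | cons ch rest ih =>
    rw [List.foldl_cons]
    by_cases hc : ch = '[' ∨ ch = ']'
    · have hstep : verify_step (o, win p, sup, hyp) ch = (!o, win [], sup, hyp) := by
        rw [verify_step, ← win_nil]
        simp [hc]
      rw [hstep, ih [] (!o) sup hyp, splitBr_cons_bracket ch rest hc]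
      simp [hitsOf, segD]
    · have hstep : verify_step (o, win p, sup, hyp) ch =
          (o, win (p ++ [ch]), sup || (hitAt p ch && o), hyp || (hitAt p ch && !o)) := by
        rw [verify_step, win_append]
        simp only [hc, if_false]
        rfl
      rw [hstep, ih (p ++ [ch]) o _ _, splitBr_cons_char ch rest hc]
      rw [show hitsOf p ((ch :: (splitBr rest).headI) :: (splitBr rest).tail) o =
            ((o && (hitAt p ch || segD (p ++ [ch]) (splitBr rest).headI)) ||
              (hitsOf [] (splitBr rest).tail (!o)).1,
             ((!o) && (hitAt p ch || segD (p ++ [ch]) (splitBr rest).headI)) ||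
              (hitsOf [] (splitBr rest).tail (!o)).2) from rfl]
      rw [show hitsOf (p ++ [ch]) (splitBr rest) o =
            hitsOf (p ++ [ch]) ((splitBr rest).headI :: (splitBr rest).tail) o from by
        rw [← splitBr_head_tail]]
      rw [show hitsOf (p ++ [ch]) ((splitBr rest).headI :: (splitBr rest).tail) o =
            ((o && segD (p ++ [ch]) (splitBr rest).headI) ||
              (hitsOf [] (splitBr rest).tail (!o)).1,
             ((!o) && segD (p ++ [ch]) (splitBr rest).headI) ||
              (hitsOf [] (splitBr rest).tail (!o)).2) from rfl]
      rw [Prod.mk.injEq]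
      constructor
      · exact or_and_shuffle sup (hitAt p ch) o _ _
      · exact or_and_shuffle hyp (hitAt p ch) (!o) _ _

theorem hitAt_iff (p : List Char) (ch : Char) :
    hitAt p ch = true ↔
      3 ≤ p.length ∧ p[p.length-3]? = some ch ∧ p[p.length-2]? = p[p.length-1]? ∧
        p[p.length-3]? ≠ p[p.length-2]? := by
  unfold hitAt win
  by_cases h3 : 3 ≤ p.length
  · rw [if_pos h3, if_pos (by omega), if_pos (by omega)]
    simp only [Bool.and_eq_true, beq_iff_eq, bne_iff_ne, ne_eq, Option.isSome_iff_exists]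
    constructor
    · rintro ⟨⟨⟨hx, hy⟩, hz⟩, hw⟩
      exact ⟨h3, hy, hz, hw⟩
    · rintro ⟨_, h1, h2, h4⟩
      exact ⟨⟨⟨⟨ch, h1⟩, h1⟩, h2⟩, h4⟩
  · rw [if_neg h3]
    simp [h3]

theorem segD_iff (s : List Char) (p : List Char) :
    segD p s = true ↔
      ∃ i : Nat, i < s.length ∧ 3 ≤ p.length + i ∧
        ((p ++ s)[p.length+i-3]? = (p ++ s)[p.length+i]? ∧
         (p ++ s)[p.length+i-2]? = (p ++ s)[p.length+i-1]? ∧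
         (p ++ s)[p.length+i-3]? ≠ (p ++ s)[p.length+i-2]?) := by
  induction s generalizing p with
  | nil => simp [segD]
  | cons ch rest ih =>
    rw [show segD p (ch :: rest) = (hitAt p ch || segD (p ++ [ch]) rest) from rfl]
    rw [Bool.or_eq_true, hitAt_iff, ih (p ++ [ch])]
    have hassoc : p ++ ch :: rest = (p ++ [ch]) ++ rest := by simp
    have hlen : (p ++ [ch]).length = p.length + 1 := by simp
    constructor
    · rintro (⟨h3, h1, h2, h4⟩ | ⟨j, hj, h3, hc1, hc2, hc3⟩)
      · refine ⟨0, by simp, by omega, ?_⟩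
        have e0 : (p ++ ch :: rest)[p.length + 0]? = some ch := by
          rw [add_zero, List.getElem?_append_right (le_refl _)]; simp
        have e3 : (p ++ ch :: rest)[p.length + 0 - 3]? = p[p.length-3]? := by
          rw [add_zero]; exact List.getElem?_append_left (by omega)
        have e2 : (p ++ ch :: rest)[p.length + 0 - 2]? = p[p.length-2]? := by
          rw [add_zero]; exact List.getElem?_append_left (by omega)
        have e1 : (p ++ ch :: rest)[p.length + 0 - 1]? = p[p.length-1]? := by
          rw [add_zero]; exact List.getElem?_append_left (by omega)
        rw [e0, e3, e2, e1]
        exact ⟨h1, h2, h4⟩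
      · refine ⟨j + 1, by simp; omega, by omega, ?_⟩
        rw [hassoc]
        rw [show p.length + (j + 1) = (p ++ [ch]).length + j from by simp; omega]
        exact ⟨hc1, hc2, hc3⟩
    · rintro ⟨i, hi, h3, hc1, hc2, hc3⟩
      match i with
      | 0 =>
        left
        have e0 : (p ++ ch :: rest)[p.length + 0]? = some ch := by
          rw [add_zero, List.getElem?_append_right (le_refl _)]; simp
        have e3 : (p ++ ch :: rest)[p.length + 0 - 3]? = p[p.length-3]? := by
          rw [add_zero]; exact List.getElem?_append_left (by omega)
        have e2 : (p ++ ch :: rest)[p.length + 0 - 2]? = p[p.length-2]? := by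
          rw [add_zero]; exact List.getElem?_append_left (by omega)
        have e1 : (p ++ ch :: rest)[p.length + 0 - 1]? = p[p.length-1]? := by
          rw [add_zero]; exact List.getElem?_append_left (by omega)
        rw [e3, e0] at hc1
        rw [e2, e1] at hc2
        rw [e3, e2] at hc3
        exact ⟨by omega, hc1, hc2, hc3⟩
      | j + 1 =>
        right
        refine ⟨j, by simp at hi; omega, by omega, ?_⟩
        rw [hassoc] at hc1 hc2 hc3
        rw [show p.length + (j + 1) = (p ++ [ch]).length + j from by simp; omega] at hc1 hc2 hc3
        exact ⟨hc1, hc2, hc3⟩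

theorem segD_nil_eq_find_abba (s : List Char) : segD [] s = find_abba s := by
  rw [Bool.eq_iff_iff, segD_iff, find_abba_iff]
  simp only [List.nil_append, List.length_nil, Nat.zero_add]
  constructor
  · rintro ⟨i, hi, h3, hc1, hc2, hc3⟩
    have e0 : s[i]? = some (s[i]'(by omega)) := List.getElem?_eq_getElem _
    have e3 : s[i-3]? = some (s[i-3]'(by omega)) := List.getElem?_eq_getElem _
    have e2 : s[i-2]? = some (s[i-2]'(by omega)) := List.getElem?_eq_getElem _
    have e1 : s[i-1]? = some (s[i-1]'(by omega)) := List.getElem?_eq_getElem _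
    rw [e3, e0] at hc1
    rw [e2, e1] at hc2
    rw [e3, e2] at hc3
    refine ⟨i - 3, by omega, ?_, ?_, ?_⟩
    · simp only [show i - 3 + 3 = i from by omega]
      exact Option.some.inj hc1
    · simp only [show i - 3 + 1 = i - 2 from by omega, show i - 3 + 2 = i - 1 from by omega]
      exact Option.some.inj hc2
    · simp only [show i - 3 + 1 = i - 2 from by omega]
      exact fun h => hc3 (by rw [h])
  · rintro ⟨k, hk, h1, h2, h3⟩
    refine ⟨k + 3, by omega, by omega, ?_, ?_, ?_⟩
    · rw [show k + 3 - 3 = k from by omega,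
        List.getElem?_eq_getElem (by omega : k < s.length),
        List.getElem?_eq_getElem (by omega : k + 3 < s.length)]
      exact congrArg some h1
    · rw [show k + 3 - 2 = k + 1 from by omega, show k + 3 - 1 = k + 2 from by omega,
        List.getElem?_eq_getElem (by omega : k + 1 < s.length),
        List.getElem?_eq_getElem (by omega : k + 2 < s.length)]
      exact congrArg some h2
    · rw [show k + 3 - 3 = k from by omega, show k + 3 - 2 = k + 1 from by omega,
        List.getElem?_eq_getElem (by omega : k < s.length),
        List.getElem?_eq_getElem (by omega : k + 1 < s.length)]
      exact fun h => h3 (Option.some.inj h)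

theorem hitsOf_eq (segs : List (List Char)) (o : Bool) :
    hitsOf [] segs o =
      ((supers segs o).any find_abba, (supers segs (!o)).any find_abba) := by
  induction segs generalizing o with
  | nil => simp [hitsOf, supers]
  | cons s rest ih =>
    rw [show hitsOf [] (s :: rest) o =
          ((o && segD [] s) || (hitsOf [] rest (!o)).1,
           ((!o) && segD [] s) || (hitsOf [] rest (!o)).2) from rfl]
    rw [ih (!o), segD_nil_eq_find_abba]
    cases o <;> simp [supers]

-- ===== VERDICT (by name: the statement is the Claim_ definition above) =====
theorem verify_ip_spec : Claim_equal_verify_ip := by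
  intro instr _ _
  unfold Spec_verify_ip verify_ip verify_ip_alt
  simp only []
  set cs := instr.toList with hcs
  set o : Bool := PySem.List.pyGetD cs 0 ' ' != '[' with ho
  have hout : (if PySem.List.pyGetD cs 0 ' ' ≠ '[' then true else false) = o := by
    rw [ho]; by_cases h : PySem.List.pyGetD cs 0 ' ' = '[' <;> simp [h]
  rw [hout, splitOn_eq_splitBr, verify_ip_loop_eq]
  have hwin : ((none, none, none) : Option Char × Option Char × Option Char) = win [] := by
    simp [win]
  rw [hwin]
  have hf := foldl_verify_step cs [] o false false
  have h1 : (cs.foldl verify_step (o, win [], false, false)).2.2.1 =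
      (hitsOf [] (splitBr cs) o).1 := by rw [hf]; simp
  have h2 : (cs.foldl verify_step (o, win [], false, false)).2.2.2 =
      (hitsOf [] (splitBr cs) o).2 := by rw [hf]; simp
  rw [h1, h2, hitsOf_eq]
  simp
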